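-- pv_equiv track=rewrite | github.com/EduardoSantos7/Algorithms4fun | Leetcode/227. Basic Calculator II/solution.py | get_next_int
-- ===== SOURCE A (Python) =====
-- def get_next_int(s, i):
--     stack = []
--     counter = 1
--     for i in range(i + 1, len(s)):
--         if s[i].isdigit():
--             stack.append(s[i])
--         elif s[i] in "+-*/":
--             break
--
--         counter += 1
--
--     return counter, int("".join(stack))
-- ===== SOURCE B (Python) =====
-- def get_next_int(s, i):
--     # Operator-search version: instead of scanning character by character,
--     # ask str.find for the first occurrence of each operator after i, take the
--     # minimum as the boundary j, then parse the digits of the slice s[i+1:j].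
--     start = i + 1
--     cuts = [p for p in (s.find(op, start) for op in "+-*/") if p != -1]
--     j = min(cuts) if cuts else len(s)
--     return j - i, int("".join(c for c in s[start:j] if c.isdigit()))
-- ===== Notes on version B (the rewrite author's own statement) =====
-- stated objective: alternative
-- what changed: A scans character by character from i+1, accumulating a digit stack and a counter until it hits an operator; B does no character loop at all: it queries str.find for the first occurrence of each of the four operators after i, takes the minimum hit (or len(s)) as the boundary j, and parses the digits of the slice s[i+1:j].
-- outside the precondition, e.g. on get_next_int('12', -2): A returns (4, 212), B returns (4, 2); on get_next_int('+5', -2): A returns (2, 5), B returns (4, 5)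
import Mathlib
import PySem

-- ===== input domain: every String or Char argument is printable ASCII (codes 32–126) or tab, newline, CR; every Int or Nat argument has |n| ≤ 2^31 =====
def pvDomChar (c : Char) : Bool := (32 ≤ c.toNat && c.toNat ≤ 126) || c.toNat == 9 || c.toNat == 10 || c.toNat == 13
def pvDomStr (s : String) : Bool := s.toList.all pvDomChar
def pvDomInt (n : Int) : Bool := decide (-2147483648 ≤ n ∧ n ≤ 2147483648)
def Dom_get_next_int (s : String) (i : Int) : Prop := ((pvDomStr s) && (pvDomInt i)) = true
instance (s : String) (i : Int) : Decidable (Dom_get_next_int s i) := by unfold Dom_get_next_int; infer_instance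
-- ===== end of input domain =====

-- B replaces A's character-by-character scan by four str.find queries whose minimum gives the boundary, then parses the digits of the slice (alternative strategy, same cost).


-- ===== PORT A =====
-- s[i] in "+-*/" on a single character
def pvIsOp (c : Char) : Bool := c == '+' || c == '-' || c == '*' || c == '/'

-- A's for-loop over range(i+1, len(s)) with break, carrying (stack, counter)
def pvAuxA (s : String) : List Int → List Char → Int → (List Char × Int)
  | [], stack, counter => (stack, counter)
  | j :: rest, stack, counter =>
    let c := (PySem.Str.pyGet? s j).getD ' '
    if PySem.Chars.isdigit c then pvAuxA s rest (stack ++ [c]) (counter + 1)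
    else if pvIsOp c then (stack, counter)
    else pvAuxA s rest stack (counter + 1)

def get_next_int (s : String) (i : Int) : Int × Int :=
  let r := pvAuxA s (PySem.List.pyRange (i + 1) (PySem.Str.len s) 1) [] 1
  -- int("".join(stack)); raises ValueError on the empty stack — excluded by Pre_
  (r.2, (PySem.Int.ofChars? r.1).getD 0)

-- ===== PORT B =====
-- cuts = [p for p in (s.find(op, start) for op in "+-*/") if p != -1]
-- j = min(cuts) if cuts else len(s); digits of s[start:j]
def get_next_int_alt (s : String) (i : Int) : Int × Int :=
  let start := i + 1
  let cuts := (['+', '-', '*', '/'].map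
      (fun op => PySem.Str.findFrom s (String.ofList [op]) start)).filter (fun p => p ≠ -1)
  let j := match PySem.List.min? cuts (fun x => x) with
    | some m => m
    | none => PySem.Str.len s
  -- int("".join(…)); raises ValueError when the slice holds no digit — excluded by Pre_
  (j - i, (PySem.Int.ofChars?
      ((PySem.List.slice s.toList (some start) (some j)).filter PySem.Chars.isdigit)).getD 0)

-- ===== PRECONDITION & SPEC =====
-- Pre_ excludes (a) inputs whose scanned region s[i+1:] holds no digit before its first
-- operator, where A's int("") raises ValueError, and (b) start indices i < -1, where A's scan
-- reads the string through Python's negative-index wraparound (an accident of indexing): there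
-- A's value, where it returns one, is the wraparound artefact and B returns the value of its
-- own find-from-start reading (see cites).
def Pre_get_next_int (s : String) (i : Int) : Prop :=
  -1 ≤ i ∧
  (((s.toList.drop (i + 1).toNat).takeWhile (fun c => !pvIsOp c)).any PySem.Chars.isdigit) = true
instance (s : String) (i : Int) : Decidable (Pre_get_next_int s i) := by
  unfold Pre_get_next_int; infer_instance

def pvWitness_get_next_int : String × Int := ("3+ 45*2", 1)

def Spec_get_next_int (s : String) (i : Int) (out : Int × Int) : Prop := out = get_next_int_alt s i
instance (s : String) (i : Int) (out : Int × Int) : Decidable (Spec_get_next_int s i out) := by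
  unfold Spec_get_next_int; infer_instance

-- ===== CLAIM (what is proved, stated in full; the proofs are below) =====
def Claim_equal_get_next_int : Prop :=
  ∀ (s : String) (i : Int), Dom_get_next_int s i → Pre_get_next_int s i →
    Spec_get_next_int s i (get_next_int s i)

-- ===== LEMMAS AND PROOFS =====

theorem pvIsOp_not_digit (c : Char) (h : pvIsOp c = true) : PySem.Chars.isdigit c = false := by
  simp [pvIsOp] at h
  obtain ((h | h) | h) | h := h <;> subst h <;> decide

theorem pvAuxA_eq (s : String) (k : Nat) (stack : List Char) (counter : Int) :
    pvAuxA s (PySem.List.pyRange (k : Int) (PySem.Str.len s) 1) stack counter =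
      (stack ++ ((s.toList.drop k).takeWhile (fun c => !pvIsOp c)).filter PySem.Chars.isdigit,
       counter + ((s.toList.drop k).takeWhile (fun c => !pvIsOp c)).length) := by
  suffices H : ∀ (n k : Nat) (stack : List Char) (counter : Int), s.toList.length - k ≤ n →
      pvAuxA s (PySem.List.pyRange (k : Int) (PySem.Str.len s) 1) stack counter =
      (stack ++ ((s.toList.drop k).takeWhile (fun c => !pvIsOp c)).filter PySem.Chars.isdigit,
       counter + ((s.toList.drop k).takeWhile (fun c => !pvIsOp c)).length) by
    exact H _ k stack counter le_rfl
  intro n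
  induction n with
  | zero =>
    intro k stack counter h
    have hk : s.toList.length ≤ k := by omega
    rw [List.drop_eq_nil_of_le hk,
      PySem.List.pyRange_one_eq_nil (by rw [PySem.Str.len_eq]; exact_mod_cast hk)]
    simp [pvAuxA]
  | succ n ih =>
    intro k stack counter h
    by_cases hk : k < s.toList.length
    · rw [PySem.List.pyRange_one_cons (by rw [PySem.Str.len_eq]; exact_mod_cast hk)]
      have hget : PySem.Str.pyGet? s (k : Int) = some s.toList[k] := by
        simp [List.getElem?_eq_getElem hk]
      have hdrop : s.toList.drop k = s.toList[k] :: s.toList.drop (k + 1) :=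
        List.drop_eq_getElem_cons hk
      have hcast : (k : Int) + 1 = ((k + 1 : Nat) : Int) := by push_cast; ring
      rw [hdrop, List.takeWhile_cons]
      by_cases hop : pvIsOp s.toList[k]
      · have hd : PySem.Chars.isdigit s.toList[k] = false := pvIsOp_not_digit _ hop
        rw [if_neg (by simp [hop])]
        simp only [pvAuxA, hget, Option.getD_some, hd, Bool.false_eq_true, if_false, hop, if_true]
        simp
      · rw [if_pos (by simp [hop])]
        have hopf : pvIsOp s.toList[k] = false := by simpa using hop
        by_cases hd : PySem.Chars.isdigit s.toList[k]
        · simp only [pvAuxA, hget, Option.getD_some, hd, if_true]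
          rw [hcast, ih (k + 1) (stack ++ [s.toList[k]]) (counter + 1) (by omega)]
          rw [List.filter_cons_of_pos hd, Prod.mk.injEq]
          refine ⟨by simp, by simp; ring⟩
        · have hdf : PySem.Chars.isdigit s.toList[k] = false := by simpa using hd
          simp only [pvAuxA, hget, Option.getD_some, hdf, Bool.false_eq_true, if_false, hopf]
          rw [hcast, ih (k + 1) stack (counter + 1) (by omega)]
          rw [List.filter_cons_of_neg (by simp [hdf]), Prod.mk.injEq]
          refine ⟨rfl, by simp; ring⟩
    · have hk' : s.toList.length ≤ k := by omega
      rw [List.drop_eq_nil_of_le hk',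
        PySem.List.pyRange_one_eq_nil (by rw [PySem.Str.len_eq]; exact_mod_cast hk')]
      simp [pvAuxA]

theorem pvSinglePrefix (c : Char) (l : List Char) : [c] <+: l ↔ l.head? = some c := by
  cases l <;> simp [List.cons_prefix_iff]

-- Characterisation of the first operator index found via per-operator find + minimum:
-- on the suffix m := s.toList.drop k, with L := m.takeWhile (!pvIsOp ·),
-- find m [c] for an operator c is -1 when c ∉ m, never points into L, and equals
-- L.length exactly for the operator that sits at position L.length (if any).
theorem pvFindOpLB (m : List Char) (c : Char) (hc : pvIsOp c = true)
    (hf : PySem.Chars.find m [c] ≠ -1) :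
    ((m.takeWhile (fun c => !pvIsOp c)).length : Int) ≤ PySem.Chars.find m [c] := by
  have h0 : 0 ≤ PySem.Chars.find m [c] := by
    have := PySem.Chars.neg_one_le_find m [c]; omega
  obtain ⟨hpre, -⟩ := PySem.Chars.find_spec h0
  rw [pvSinglePrefix] at hpre
  by_contra hlt
  rw [not_le] at hlt
  set f := (PySem.Chars.find m [c]).toNat with hfdef
  have hflt : f < (m.takeWhile (fun c => !pvIsOp c)).length := by omega
  have hmem : c ∈ m.takeWhile (fun c => !pvIsOp c) := by
    have hget : (m.takeWhile (fun c => !pvIsOp c))[f]? = some c := by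
      have hdt : (m.takeWhile (fun c => !pvIsOp c)).drop f <+: m.drop f :=
        (List.takeWhile_prefix _).drop f
      have hne : (m.takeWhile (fun c => !pvIsOp c)).drop f ≠ [] := by
        simp [List.drop_eq_nil_iff]; omega
      have hh : ((m.takeWhile (fun c => !pvIsOp c)).drop f).head? = some c := by
        obtain ⟨t, ht⟩ := hdt
        rw [← ht] at hpre
        cases h : (m.takeWhile (fun c => !pvIsOp c)).drop f with
        | nil => exact absurd h hne
        | cons a l => rw [h] at hpre; simpa using hpre
      rw [List.head?_drop] at hh
      exact hh
    exact List.mem_of_getElem? hget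
  have := List.mem_takeWhile_imp hmem
  simp [hc] at this
theorem pvFindOpAt (m : List Char) (c : Char)
    (hhead : (m.dropWhile (fun c => !pvIsOp c)).head? = some c) :
    PySem.Chars.find m [c] = ((m.takeWhile (fun c => !pvIsOp c)).length : Int) := by
  have hc : pvIsOp c = true := by
    have := List.head?_dropWhile_not (p := fun c => !pvIsOp c) (l := m)
    rw [hhead] at this
    simpa using this
  have hdw : m.dropWhile (fun c => !pvIsOp c) =
      m.drop (m.takeWhile (fun c => !pvIsOp c)).length :=
    calc m.dropWhile (fun c => !pvIsOp c)
        = List.drop (m.takeWhile (fun c => !pvIsOp c)).length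
            (m.takeWhile (fun c => !pvIsOp c) ++ m.dropWhile (fun c => !pvIsOp c)) :=
          List.drop_left.symm
      _ = m.drop (m.takeWhile (fun c => !pvIsOp c)).length := by
          rw [List.takeWhile_append_dropWhile]
  have hocc : [c] <+: m.drop (m.takeWhile (fun c => !pvIsOp c)).length := by
    rw [pvSinglePrefix, ← hdw]
    exact hhead
  have hne : PySem.Chars.find m [c] ≠ -1 := by
    rw [PySem.Chars.find_ne_neg_one_iff, List.singleton_infix_iff]
    have := List.mem_of_mem_head? hhead
    exact (List.dropWhile_sublist _).mem this
  have h0 : 0 ≤ PySem.Chars.find m [c] := by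
    have := PySem.Chars.neg_one_le_find m [c]; omega
  obtain ⟨-, hmin⟩ := PySem.Chars.find_spec h0
  have hub : (PySem.Chars.find m [c]).toNat ≤ (m.takeWhile (fun c => !pvIsOp c)).length := by
    by_contra hgt
    exact hmin _ (by omega) hocc
  have hlb := pvFindOpLB m c hc hne
  omega

-- The boundary B computes (min of the per-operator finds, or len(s)) is exactly
-- k + length of the operator-free prefix of s.toList.drop k.
theorem pvBoundary (s : String) (k : Nat) (hk : k < s.toList.length) :
    (match PySem.List.min?
        ((['+', '-', '*', '/'].map
            (fun op => PySem.Str.findFrom s (String.ofList [op]) (k : Int))).filter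
          (fun p => p ≠ -1)) (fun x => x) with
      | some m => m
      | none => PySem.Str.len s)
    = (k : Int) + ((s.toList.drop k).takeWhile (fun c => !pvIsOp c)).length := by
  have hk' : k ≤ s.toList.length := le_of_lt hk
  set m := s.toList.drop k with hm
  set L := m.takeWhile (fun c => !pvIsOp c) with hL
  have hF : ∀ op : Char, PySem.Str.findFrom s (String.ofList [op]) (k : Int) =
      if PySem.Chars.find m [op] = -1 then -1 else (k : Int) + PySem.Chars.find m [op] := by
    intro op
    rw [PySem.Str.findFrom_eq]
    have h1 : (String.ofList [op]).toList = [op] := by simp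
    rw [h1, PySem.Chars.findFrom_natCast s.toList [op] k hk']
  have hcutsLB : ∀ x ∈ (['+', '-', '*', '/'].map
      (fun op => PySem.Str.findFrom s (String.ofList [op]) (k : Int))).filter
        (fun p => p ≠ -1), (k : Int) + (L.length : Int) ≤ x := by
    intro x hx
    rw [List.mem_filter] at hx
    obtain ⟨hx1, hx2⟩ := hx
    rw [List.mem_map] at hx1
    obtain ⟨op, hop, hxeq⟩ := hx1
    have hopIs : pvIsOp op = true := by
      simp only [List.mem_cons, List.not_mem_nil, or_false] at hop
      obtain h | h | h | h := hop <;> subst h <;> decide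
    rw [hF op] at hxeq
    simp only [decide_not] at hx2
    by_cases hfn : PySem.Chars.find m [op] = -1
    · rw [if_pos hfn] at hxeq; subst hxeq; simp at hx2
    · rw [if_neg hfn] at hxeq
      have hlb := pvFindOpLB m op hopIs hfn
      rw [← hL] at hlb
      omega
  cases hdw : m.dropWhile (fun c => !pvIsOp c) with
  | nil =>
    have hLm : L = m := by
      have h2 := List.takeWhile_append_dropWhile (p := fun c => !pvIsOp c) (l := m)
      rw [hdw, List.append_nil] at h2
      rw [hL, h2]
    have hnone : ∀ op ∈ ['+', '-', '*', '/'], pvIsOp op = true := by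
      intro op hop
      simp only [List.mem_cons, List.not_mem_nil, or_false] at hop
      obtain h | h | h | h := hop <;> subst h <;> rfl
    have hallF : ∀ op ∈ ['+', '-', '*', '/'],
        PySem.Str.findFrom s (String.ofList [op]) (k : Int) = -1 := by
      intro op hop
      rw [hF op, if_pos]
      rw [PySem.Chars.find_eq_neg_one_iff, List.singleton_infix_iff]
      intro hmem
      have hop' : op ∈ L := hLm ▸ hmem
      have hop'' := List.mem_takeWhile_imp hop'
      have hopIs := hnone op hop
      simp [hopIs] at hop''
    have hcuts : (['+', '-', '*', '/'].map
        (fun op => PySem.Str.findFrom s (String.ofList [op]) (k : Int))).filter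
          (fun p => p ≠ -1) = [] := by
      rw [List.filter_eq_nil_iff]
      intro x hx
      rw [List.mem_map] at hx
      obtain ⟨op, hop, hxeq⟩ := hx
      rw [hallF op hop] at hxeq
      simp [← hxeq]
    rw [hcuts]
    show PySem.Str.len s = (k : Int) + (L.length : Int)
    rw [PySem.Str.len_eq, hLm]
    have hlen : m.length = s.toList.length - k := by rw [hm, List.length_drop]
    omega
  | cons c0 rest =>
    have hhead : (m.dropWhile (fun c => !pvIsOp c)).head? = some c0 := by rw [hdw]; rfl
    have hc0 : pvIsOp c0 = true := by
      have hx := List.head?_dropWhile_not (p := fun c => !pvIsOp c) (l := m)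
      rw [hhead] at hx
      simpa using hx
    have hfind := pvFindOpAt m c0 hhead
    have hmemBase : PySem.Str.findFrom s (String.ofList [c0]) (k : Int) ∈
        (['+', '-', '*', '/'].map
          (fun op => PySem.Str.findFrom s (String.ofList [op]) (k : Int))) := by
      apply List.mem_map_of_mem
      simp only [pvIsOp, Bool.or_eq_true, beq_iff_eq] at hc0
      simp only [List.mem_cons]
      rcases hc0 with ((h | h) | h) | h
      · exact Or.inl (by simpa using h)
      · exact Or.inr (Or.inl (by simpa using h))
      · exact Or.inr (Or.inr (Or.inl (by simpa using h)))
      · exact Or.inr (Or.inr (Or.inr (Or.inl (by simpa using h))))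
    have hval : PySem.Str.findFrom s (String.ofList [c0]) (k : Int) =
        (k : Int) + (L.length : Int) := by
      rw [hF c0, if_neg (by rw [hfind]; omega), hfind]
    have hmem : ((k : Int) + (L.length : Int)) ∈ (['+', '-', '*', '/'].map
        (fun op => PySem.Str.findFrom s (String.ofList [op]) (k : Int))).filter
          (fun p => p ≠ -1) := by
      rw [List.mem_filter]
      refine ⟨hval ▸ hmemBase, by simp; omega⟩
    obtain ⟨mm, hmm⟩ : ∃ mm, PySem.List.min? ((['+', '-', '*', '/'].map
        (fun op => PySem.Str.findFrom s (String.ofList [op]) (k : Int))).filter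
          (fun p => p ≠ -1)) (fun x => x) = some mm := by
      cases hmin : PySem.List.min? ((['+', '-', '*', '/'].map
          (fun op => PySem.Str.findFrom s (String.ofList [op]) (k : Int))).filter
            (fun p => p ≠ -1)) (fun x => x) with
      | none =>
        rw [PySem.List.min?_eq_none_iff] at hmin
        rw [hmin] at hmem
        simp at hmem
      | some mm => exact ⟨mm, rfl⟩
    rw [hmm]
    show mm = (k : Int) + (L.length : Int)
    have hle1 : mm ≤ (k : Int) + (L.length : Int) := PySem.List.min?_isMin hmm _ hmem
    have hle2 : (k : Int) + (L.length : Int) ≤ mm := hcutsLB mm (PySem.List.min?_mem hmm)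
    omega

-- ===== VERDICT (by name: the statement is the Claim_ definition above) =====
theorem get_next_int_spec : Claim_equal_get_next_int := by
  intro s i _ hpre
  obtain ⟨h1, hdig⟩ := hpre
  obtain ⟨k, hk⟩ : ∃ k : Nat, i + 1 = (k : Int) := ⟨(i + 1).toNat, by omega⟩
  have htn : (i + 1).toNat = k := by omega
  rw [htn] at hdig
  have hklen : k < s.toList.length := by
    by_contra hge
    rw [List.drop_eq_nil_of_le (by omega)] at hdig
    simp at hdig
  unfold Spec_get_next_int get_next_int get_next_int_alt
  dsimp only
  rw [hk, pvAuxA_eq, pvBoundary s k hklen]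
  rw [PySem.List.slice_natCast_add,
    (List.prefix_iff_eq_take.mp (List.takeWhile_prefix _)).symm, Prod.mk.injEq]
  refine ⟨by omega, rfl⟩
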